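-- pv_equiv track=rewrite | github.com/RhoA1as/LeetcodePractice | Leetcodepy/leetcode2.py | maximumEvenSplit
-- ===== SOURCE A (Python) =====
-- from typing import List, Optional
--
-- def maximumEvenSplit(finalSum: int) -> List[int]:
--     if finalSum & 1:
--         return []
--     i, ans = 2, []
--     while i <= finalSum:
--         ans.append(i)
--         finalSum -= i
--         i += 2
--     ans[-1] += finalSum
--     return ans
-- ===== SOURCE B (Python) =====
-- from typing import List
--
-- def maximumEvenSplit(finalSum: int) -> List[int]:
--     if finalSum & 1:
--         return []
--     # largest k with k*(k+1) <= finalSum, by binary search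
--     lo, hi = 0, finalSum
--     while lo < hi:
--         mid = (lo + hi + 1) // 2
--         if mid * (mid + 1) <= finalSum:
--             lo = mid
--         else:
--             hi = mid - 1
--     # k-1 smallest even numbers, then the rest as the last element
--     return [2 * j for j in range(1, lo)] + [finalSum - lo * (lo - 1)]
-- ===== Notes on version B (the rewrite author's own statement) =====
-- stated objective: alternative
-- what changed: Replaces A's subtract-and-append accumulation loop by a binary search for the largest k with k*(k+1) <= finalSum plus a direct materialization of the k terms (closed-form last element instead of an in-place fixup).
-- outside the precondition, e.g. on maximumEvenSplit(0): A raises IndexError, B returns [0]; on maximumEvenSplit(-2): A raises IndexError, B returns [-2]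
import Mathlib
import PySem

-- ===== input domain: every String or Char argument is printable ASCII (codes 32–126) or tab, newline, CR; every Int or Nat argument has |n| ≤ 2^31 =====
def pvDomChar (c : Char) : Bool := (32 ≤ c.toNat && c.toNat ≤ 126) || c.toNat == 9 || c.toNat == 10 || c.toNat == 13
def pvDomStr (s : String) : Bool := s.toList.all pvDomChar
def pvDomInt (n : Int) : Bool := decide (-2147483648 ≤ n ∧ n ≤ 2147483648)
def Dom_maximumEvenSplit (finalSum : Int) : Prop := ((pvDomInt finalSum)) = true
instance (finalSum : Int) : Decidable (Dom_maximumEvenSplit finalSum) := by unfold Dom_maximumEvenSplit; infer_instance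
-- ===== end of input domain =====

-- B replaces A's accumulation loop with a binary search for the split size plus a direct
-- materialization (objective: alternative algorithm, similar cost).

-- ===== PORT A =====
-- the while loop: state (finalSum, i, ans); returns (ans, leftover finalSum)
def aLoop (finalSum i : Int) (ans : List Int) : List Int × Int :=
  if i ≤ finalSum then aLoop (finalSum - i) (i + 2) (ans ++ [i]) else (ans, finalSum)
termination_by ((2 - i).toNat, (finalSum + 2 - i).toNat)
decreasing_by
  simp only [Prod.lex_def]
  omega

-- ans[-1] += v  (Python raises IndexError on []; that case is excluded by Pre_)
def pyLastAdd : List Int → Int → List Int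
  | [], _ => []
  | [x], v => [x + v]
  | x :: y :: t, v => x :: pyLastAdd (y :: t) v

def maximumEvenSplit (finalSum : Int) : List Int :=
  if PySem.Int.band finalSum 1 ≠ 0 then []   -- if finalSum & 1: return []
  else
    let r := aLoop finalSum 2 []
    pyLastAdd r.1 r.2

-- ===== PORT B =====
-- while lo < hi binary search for the largest k with k*(k+1) <= finalSum
def bsearchK (finalSum lo hi : Int) : Int :=
  if lo < hi then
    let mid := PySem.Int.floordiv (lo + hi + 1) 2
    if mid * (mid + 1) ≤ finalSum then bsearchK finalSum mid hi
    else bsearchK finalSum lo (mid - 1)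
  else lo
termination_by (hi - lo).toNat
decreasing_by
  all_goals
    rw [PySem.Int.floordiv_eq_ediv_of_pos (by omega)] at *
    omega

def maximumEvenSplit_alt (finalSum : Int) : List Int :=
  if PySem.Int.band finalSum 1 ≠ 0 then []
  else
    let k := bsearchK finalSum 0 finalSum
    (PySem.List.pyRange 1 k 1).map (fun j => 2 * j) ++ [finalSum - k * (k - 1)]

-- ===== PRECONDITION & SPEC =====
-- Pre_ excludes exactly the even finalSum ≤ 0 (e.g. 0, -2): there A's ans is [] and
-- 'ans[-1] += finalSum' raises IndexError, so A returns no value.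
def Pre_maximumEvenSplit (finalSum : Int) : Prop := finalSum % 2 ≠ 0 ∨ 2 ≤ finalSum
instance (finalSum : Int) : Decidable (Pre_maximumEvenSplit finalSum) := by unfold Pre_maximumEvenSplit; infer_instance
def pvWitness_maximumEvenSplit : Int := 12

def Spec_maximumEvenSplit (finalSum : Int) (out : List Int) : Prop := out = maximumEvenSplit_alt finalSum
instance (finalSum : Int) (out : List Int) : Decidable (Spec_maximumEvenSplit finalSum out) := by unfold Spec_maximumEvenSplit; infer_instance

-- ===== CLAIM (what is proved, stated in full; the proofs are below) =====
def Claim_equal_maximumEvenSplit : Prop := ∀ (finalSum : Int), Dom_maximumEvenSplit finalSum → Pre_maximumEvenSplit finalSum → Spec_maximumEvenSplit finalSum (maximumEvenSplit finalSum)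

-- ===== LEMMAS AND PROOFS =====

-- k(k+1) ≤ S < (k+1)(k+2) fixes k; first over Nat by induction from 2
theorem exists_k_nat : ∀ n : Nat, 2 ≤ n → ∃ k : Nat, 1 ≤ k ∧ k * (k + 1) ≤ n ∧ n < (k + 1) * (k + 2) := by
  intro n hn
  induction n, hn using Nat.le_induction with
  | base => exact ⟨1, by omega, by omega, by omega⟩
  | succ n hn ih =>
    obtain ⟨k, hk1, hks, hkt⟩ := ih
    by_cases h : n + 1 < (k + 1) * (k + 2)
    · exact ⟨k, hk1, by nlinarith, by nlinarith⟩
    · exact ⟨k + 1, by omega, by nlinarith, by nlinarith⟩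

theorem exists_k (S : Int) (hS : 2 ≤ S) :
    ∃ k : Int, 1 ≤ k ∧ k * (k + 1) ≤ S ∧ S < (k + 1) * (k + 2) := by
  obtain ⟨k, hk1, hks, hkt⟩ := exists_k_nat S.toNat (by omega)
  refine ⟨(k : Int), by exact_mod_cast hk1, ?_, ?_⟩
  · have : ((k * (k + 1) : Nat) : Int) ≤ ((S.toNat : Nat) : Int) := by exact_mod_cast hks
    push_cast at this; omega
  · have : ((S.toNat : Nat) : Int) < (((k + 1) * (k + 2) : Nat) : Int) := by exact_mod_cast hkt
    push_cast at this; omega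

theorem aLoop_spec (S k : Int) (hk1 : 1 ≤ k) (hks : k * (k + 1) ≤ S) (hkt : S < (k + 1) * (k + 2)) :
    ∀ (n : Nat) (m : Int) (ans : List Int), 1 ≤ m → m ≤ k + 1 → (k + 1 - m).toNat = n →
      aLoop (S - (m - 1) * m) (2 * m) ans
        = (ans ++ (PySem.List.pyRange m (k + 1) 1).map (fun j => 2 * j), S - k * (k + 1)) := by
  intro n
  induction n using Nat.strong_induction_on with
  | _ n ih =>
    intro m ans hm1 hmk hn
    rw [aLoop]
    by_cases hc : m ≤ k
    · have hg : 2 * m ≤ S - (m - 1) * m := by nlinarith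
      rw [if_pos hg]
      have h1 : S - (m - 1) * m - 2 * m = S - (m + 1 - 1) * (m + 1) := by ring
      have h2 : 2 * m + 2 = 2 * (m + 1) := by ring
      rw [h1, h2, ih (k + 1 - (m + 1)).toNat (by omega) (m + 1) (ans ++ [2 * m]) (by omega) (by omega) rfl]
      rw [PySem.List.pyRange_one_cons (by omega : m < k + 1)]
      simp
    · have hm : m = k + 1 := by omega
      have hg : ¬ (2 * m ≤ S - (m - 1) * m) := by subst hm; nlinarith
      rw [if_neg hg, hm]
      rw [PySem.List.pyRange_one_eq_nil (by omega)]
      simp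

theorem bsearchK_spec (S k : Int) (hk0 : 0 ≤ k) (hks : k * (k + 1) ≤ S) (hkt : S < (k + 1) * (k + 2)) :
    ∀ (n : Nat) (lo hi : Int), 0 ≤ lo → lo ≤ k → k ≤ hi → (hi - lo).toNat = n →
      bsearchK S lo hi = k := by
  intro n
  induction n using Nat.strong_induction_on with
  | _ n ih =>
    intro lo hi hlo0 hlok hkhi hn
    rw [bsearchK]
    by_cases hlh : lo < hi
    · rw [if_pos hlh]
      have hmid : PySem.Int.floordiv (lo + hi + 1) 2 = (lo + hi + 1) / 2 :=
        PySem.Int.floordiv_eq_ediv_of_pos (by omega)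
      set mid := PySem.Int.floordiv (lo + hi + 1) 2 with hm
      have hb1 : lo + 1 ≤ mid := by rw [hmid]; omega
      have hb2 : mid ≤ hi := by rw [hmid]; omega
      by_cases hcmp : mid * (mid + 1) ≤ S
      · rw [if_pos hcmp]
        have hmk : mid ≤ k := by nlinarith
        exact ih (hi - mid).toNat (by omega) mid hi (by omega) hmk hkhi rfl
      · rw [if_neg hcmp]
        have hmk : k ≤ mid - 1 := by nlinarith
        exact ih (mid - 1 - lo).toNat (by omega) lo (mid - 1) hlo0 hlok hmk rfl
    · rw [if_neg hlh]; omega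

theorem pyLastAdd_append (xs : List Int) (x v : Int) :
    pyLastAdd (xs ++ [x]) v = xs ++ [x + v] := by
  induction xs with
  | nil => rfl
  | cons a t ihx =>
    cases t with
    | nil => rfl
    | cons b u => simpa [pyLastAdd] using ihx

-- ===== VERDICT (by name: the statement is the Claim_ definition above) =====
theorem maximumEvenSplit_spec : Claim_equal_maximumEvenSplit := by
  intro S _ hpre
  unfold Spec_maximumEvenSplit maximumEvenSplit maximumEvenSplit_alt
  by_cases hodd : PySem.Int.band S 1 ≠ 0
  · rw [if_pos hodd, if_pos hodd]
  · rw [if_neg hodd, if_neg hodd]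
    have hband : PySem.Int.band S 1 = PySem.Int.mod S 2 := PySem.Int.band_one S
    have hmod : PySem.Int.mod S 2 = S % 2 := PySem.Int.mod_eq_emod_of_pos (by omega)
    have heven : S % 2 = 0 := by
      by_contra h
      exact hodd (by rw [hband, hmod]; exact h)
    have hS2 : 2 ≤ S := by
      rcases hpre with h | h
      · exact absurd heven h
      · exact h
    obtain ⟨k, hk1, hks, hkt⟩ := exists_k S hS2
    have hkS : k ≤ S := by nlinarith
    have hA := aLoop_spec S k hk1 hks hkt (k + 1 - 1).toNat 1 [] (by omega) (by omega) rfl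
    have hB := bsearchK_spec S k (by omega) hks hkt (S - 0).toNat 0 S (by omega) (by omega) hkS rfl
    simp only [show S - (1 - 1) * 1 = S by ring, show (2 : Int) * 1 = 2 by ring] at hA
    rw [hA, hB]
    simp only [List.nil_append]
    rw [show k + 1 = (k - 1 + 1) + 1 by ring, PySem.List.pyRange_one_succ_right (by omega)]
    rw [show k - 1 + 1 + 1 = k + 1 by ring, show k - 1 + 1 = k by ring]
    rw [List.map_append]
    simp only [List.map_cons, List.map_nil]
    rw [pyLastAdd_append]
    congr 1
    congr 1
    ring
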